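-- pv_equiv track=rewrite | github.com/NikolaosKiouftis/Projects | assignment-2023-2/interval_graphs.py | interval_grafs_lexbfs
-- ===== SOURCE A (Python) =====
-- def interval_grafs_lexbfs(g):
--     # Set with all the nodes of the graph
--     nodes = set(g.keys())
--     # List "s" containing the sorted list of no visited nodes
--     # for the partition of lists, to neighbors and no neighbors
--     s = []
--     s.append(sorted(nodes))
--     # list for the ordering of lexBFS
--     lexbfs = []
--     # Until no, no visited nodes left in list "s"
--     while len(s) != 0:
--         # If the first list of "s" is empty, remove it
--         if not s[0]:
--             s.remove(s[0])
--         # If the first list of "s" is not empty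
--         else:
--             # Remove the first node, of first list, in list "s", as visiting
--             visit = s[0].pop(0)
--             # Remove the visiting node from the set of nodes
--             # We need to have a set with the non visited nodes
--             nodes.remove(visit)
--             # Add visiting node in ordering list of lexbfs
--             lexbfs.append(visit)
--             # Set of non visited neigbors of visiting node
--             neighbors = set(g[visit]) & nodes
--             # List to hold all non visited neighbors of visiting node
--             # and the index of the list they belong in "s"
--             neighbor_position = []
--             for i in range(len(s)):
--                 # If the visiting node has non visited neighbors (to ignore empty set)
--                 # and if exists common elements between non visited neighbors and current list in "s"
--                 if neighbors & set(s[i]) and neighbors: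
--                     # list to hold non visited neighbors from the current list in "s"
--                     # and the index of current list in "s"
--                     in_same_list = []
--                     # Sorted list of non visited neighbors which they belong in the current list in "s"
--                     collected = sorted(neighbors & set(s[i]))
--                     # Append the collected neighbors
--                     in_same_list.append(collected)
--                     # Append the index of current list
--                     in_same_list.append(i)
--                     # Removing the non visited neighbors from the current list in "s"
--                     for j in range(len(collected)):
--                         s[i].remove(collected[j])
--                     # Append the list that holds the non visited neighbors found in the current list
--                     # and the index of the current list in "s"
--                     # to the list that holds the non visited neighbors of the visiting node
--                     # and the index of the list they belong in "s"
--                     neighbor_position.append(in_same_list)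
--             # If the visiting node has all non visited neighbors in one list in "s"
--             if len(neighbor_position) == 1:
--                 # Insert the non visited neighbors list before the list they were found in "s"
--                 s.insert(neighbor_position[0][1], neighbor_position[0][0])
--             # If the visiting node has non visited neighbors in different lists in "s"
--             else:
--                 while len(neighbor_position) != 0:
--                     # Insert the non visited neighbors lists before the lists they were found in "s"
--                     # starting from the end of the list "s"
--                     s.insert(neighbor_position[-1][1], neighbor_position[-1][0])
--                     # Removing from list the non visited neighbors list after positioning in "s"
--                     neighbor_position.pop(-1)
--             # Removing lists got empty, in "s"
--             for empty in s:
--                 if len(empty) == 0: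
--                     s.remove(empty)
--
--     return lexbfs
-- ===== SOURCE B (Python) =====
-- def interval_grafs_lexbfs(g):
--     # Plain partition-refinement LexBFS: keep an ordered list of (sorted) classes,
--     # pop the least node of the first class, then split every class into
--     # neighbours / non-neighbours with neighbours first, dropping empty parts.
--     order = []
--     classes = [sorted(g)] if g else []
--     while classes:
--         first = classes[0]
--         v = first[0]
--         order.append(v)
--         nbrs = set(g[v])
--         new = []
--         for c in [first[1:]] + classes[1:]:
--             inn = [x for x in c if x in nbrs]
--             out = [x for x in c if x not in nbrs]
--             if inn:
--                 new.append(inn)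
--             if out:
--                 new.append(out)
--         classes = new
--     return order
-- ===== Notes on version B (the rewrite author's own statement) =====
-- stated objective: simpler
-- what changed: B drops A's per-step set building, sorting of collected neighbours, list.remove/insert index bookkeeping and the separate empty-list cleanup passes, rebuilding the class list in one left-to-right pass that splits each class into neighbours/non-neighbours (empties dropped) and popping the head of the first class.
import Mathlib
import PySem

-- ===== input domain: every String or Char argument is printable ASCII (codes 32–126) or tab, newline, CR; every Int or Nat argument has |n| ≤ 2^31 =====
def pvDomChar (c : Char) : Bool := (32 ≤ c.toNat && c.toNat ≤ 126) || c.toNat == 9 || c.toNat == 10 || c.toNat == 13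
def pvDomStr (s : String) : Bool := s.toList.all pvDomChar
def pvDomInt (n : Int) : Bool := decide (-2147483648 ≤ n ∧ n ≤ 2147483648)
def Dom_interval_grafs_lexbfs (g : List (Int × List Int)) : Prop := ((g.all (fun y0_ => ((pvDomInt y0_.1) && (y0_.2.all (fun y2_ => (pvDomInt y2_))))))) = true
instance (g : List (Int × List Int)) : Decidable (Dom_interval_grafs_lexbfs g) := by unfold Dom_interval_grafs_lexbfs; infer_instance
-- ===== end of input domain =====

-- B replaces A's per-step sorting, set building and index/insert/remove juggling over the
-- class list by a single left-to-right rebuild of the class list (neighbour part of each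
-- class first, empties dropped) — objective: alternative (a plainer partition refinement).

-- total number of nodes stored in the class list (termination measure of both loops)
def pvSumLen (s : List (List Int)) : Nat := (s.map List.length).sum

-- ===== PORT A =====

-- the `for i in range(len(s))` loop of A: walks the class list carrying the index i,
-- removing the collected (sorted) neighbours from each class and recording (collected, i)
def lexCollect (nbrs : List Int) : List (List Int) → Nat → List (List Int) × List (List Int × Nat)
  | [], _ => ([], [])
  | C :: rest, i =>
    let res := lexCollect nbrs rest (i + 1)
    if PySem.Set.inter nbrs (PySem.Set.ofList C) ≠ [] ∧ nbrs ≠ [] then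
      let collected := PySem.List.sorted (PySem.Set.inter nbrs (PySem.Set.ofList C)) (fun x => x) false
      -- `for j in range(len(collected)): s[i].remove(collected[j])`; the remove never
      -- raises (each collected element is in the class by construction), so getD is exact
      let C' := collected.foldl (fun cur x => (PySem.List.remove? cur x).getD cur) C
      (C' :: res.1, (collected, i) :: res.2)
    else (C :: res.1, res.2)

theorem pv_cleanup_dec1 (s : List (List Int)) (idx : Nat) (h : idx < s.length) :
    ((PySem.List.remove? s ([] : List Int)).getD s).length - (idx + 1) < s.length - idx := by
  have hle : ((PySem.List.remove? s ([] : List Int)).getD s).length ≤ s.length := by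
    cases hr : PySem.List.remove? s ([] : List Int) with
    | none => simp
    | some t =>
      have : ∃ k, List.idxOf? ([] : List Int) s = some k ∧ t = s.eraseIdx k := by
        simp [PySem.List.remove?] at hr
        obtain ⟨k, hk, ht⟩ := hr; exact ⟨k, hk, ht.symm⟩
      obtain ⟨k, _, ht⟩ := this
      subst ht
      simpa using List.length_eraseIdx_le s k
  omega

theorem pv_cleanup_dec2 (s : List (List Int)) (idx : Nat) (h : idx < s.length) :
    s.length - (idx + 1) < s.length - idx := by omega

-- A's final `for empty in s: if len(empty)==0: s.remove(empty)`: Python's for-loop keeps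
-- an internal position, so removal (of the FIRST empty list) skips the next position
def lexCleanup (s : List (List Int)) (idx : Nat) : List (List Int) :=
  if h : idx < s.length then
    if s[idx] = [] then
      lexCleanup ((PySem.List.remove? s ([] : List Int)).getD s) (idx + 1)
    else lexCleanup s (idx + 1)
  else s
termination_by s.length - idx
decreasing_by
  · exact pv_cleanup_dec1 s idx h
  · exact pv_cleanup_dec2 s idx h

-- sum lemmas cited by the loops' termination proofs
theorem pv_insert_take_drop (xs : List (List Int)) (n : Nat) (v : List Int) :
    PySem.List.insert xs (n : Int) v = xs.take n ++ v :: xs.drop n := by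
  simp only [PySem.List.insert, PySem.List.sliceIndices]
  have h0 : ¬ ((n : Int) < 0) := by omega
  simp only [if_neg h0]
  norm_num
  have hm : (min (n : Int) (xs.length : Int)).toNat = min n xs.length := by omega
  rw [hm]
  rcases Nat.le_total n xs.length with h | h
  · rw [min_eq_left h]
  · rw [min_eq_right h]
    simp [List.take_of_length_le h, List.take_of_length_le (Nat.le_refl xs.length),
      List.drop_of_length_le h, List.drop_of_length_le (Nat.le_refl xs.length)]

theorem pv_insert_sum (xs : List (List Int)) (n : Nat) (v : List Int) :
    pvSumLen (PySem.List.insert xs (n : Int) v) = pvSumLen xs + v.length := by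
  rw [pv_insert_take_drop]
  simp [pvSumLen]
  have := List.sum_take_add_sum_drop (List.map List.length xs) n
  omega

theorem pv_foldr_insert_sum (np : List (List Int × Nat)) (s : List (List Int)) :
    pvSumLen (np.foldr (fun p acc => PySem.List.insert acc (p.2 : Int) p.1) s)
      = pvSumLen s + (np.map (fun p => p.1.length)).sum := by
  induction np with
  | nil => simp
  | cons p t ih => simp [List.foldr_cons, pv_insert_sum, ih]; omega

theorem pv_foldl_remove_length (l C : List Int) (hl : l.Nodup) (hsub : ∀ x ∈ l, x ∈ C) :
    (l.foldl (fun cur x => (PySem.List.remove? cur x).getD cur) C).length + l.length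
      = C.length := by
  induction l generalizing C with
  | nil => simp
  | cons x t ih =>
    have hx : x ∈ C := hsub x (by simp)
    rw [List.foldl_cons, PySem.List.remove?_eq_some_erase C x hx]
    have ht : ∀ y ∈ t, y ∈ C.erase x := by
      intro y hy
      have hyx : y ≠ x := by
        intro he; subst he; exact (List.nodup_cons.mp hl).1 hy
      exact (List.mem_erase_of_ne hyx).mpr (hsub y (by simp [hy]))
    have := ih (C.erase x) (List.nodup_cons.mp hl).2 ht
    have hlen : (C.erase x).length = C.length - 1 := List.length_erase_of_mem hx
    have hpos : 0 < C.length := List.length_pos_of_mem hx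
    simp only [Option.getD_some] at *
    simp only [List.length_cons]
    omega

theorem pv_collected_mem (nbrs C : List Int) :
    ∀ x ∈ PySem.List.sorted (PySem.Set.inter nbrs (PySem.Set.ofList C)) (fun x => x) false,
      x ∈ C := by
  intro x hx
  rw [PySem.List.mem_sorted] at hx
  have : x ∈ nbrs ∧ x ∈ PySem.Set.ofList C := by
    simpa using (PySem.Set.mem_inter nbrs (PySem.Set.ofList C) x).mp hx
  exact (PySem.Set.mem_ofList C x).mp this.2

theorem pv_collected_nodup (nbrs C : List Int) (hn : nbrs.Nodup) :
    (PySem.List.sorted (PySem.Set.inter nbrs (PySem.Set.ofList C)) (fun x => x) false).Nodup :=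
  (PySem.List.sorted_perm _ _ _).nodup_iff.mpr (PySem.Set.nodup_inter _ _ hn)

theorem pv_collect_sum (nbrs : List Int) (hn : nbrs.Nodup) :
    ∀ (s : List (List Int)) (i : Nat),
      pvSumLen (lexCollect nbrs s i).1 + ((lexCollect nbrs s i).2.map (fun p => p.1.length)).sum
        = pvSumLen s := by
  intro s
  induction s with
  | nil => intro i; simp [lexCollect, pvSumLen]
  | cons C rest ih =>
    intro i
    rw [lexCollect]
    split
    · have hrem := pv_foldl_remove_length
        (PySem.List.sorted (PySem.Set.inter nbrs (PySem.Set.ofList C)) (fun x => x) false) C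
        (pv_collected_nodup nbrs C hn) (pv_collected_mem nbrs C)
      have := ih (i + 1)
      simp only [pvSumLen, List.map_cons, List.sum_cons] at *
      omega
    · have := ih (i + 1)
      simp only [pvSumLen, List.map_cons, List.sum_cons] at *
      omega

theorem pv_sum_erase_nil (s : List (List Int)) :
    pvSumLen (s.erase ([] : List Int)) = pvSumLen s := by
  induction s with
  | nil => simp
  | cons C t ih =>
    by_cases hC : C = ([] : List Int)
    · subst hC; simp [pvSumLen]
    · rw [List.erase_cons]
      rw [if_neg (by simpa using hC)]
      simp only [pvSumLen, List.map_cons, List.sum_cons] at *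
      omega

theorem pv_cleanup_sum_le (s : List (List Int)) (idx : Nat) :
    pvSumLen (lexCleanup s idx) ≤ pvSumLen s := by
  induction s, idx using lexCleanup.induct with
  | case1 s idx h hnil ih =>
    rw [lexCleanup, dif_pos h, if_pos hnil]
    refine le_trans ih ?_
    cases hr : PySem.List.remove? s ([] : List Int) with
    | none => simp
    | some t =>
      have hmem : ([] : List Int) ∈ s := by
        by_contra hne
        rw [(PySem.List.remove?_eq_none_iff s ([] : List Int)).mpr hne] at hr
        simp at hr
      rw [PySem.List.remove?_eq_some_erase s ([] : List Int) hmem] at hr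
      cases hr
      simp [pv_sum_erase_nil]
  | case2 s idx h hnil ih =>
    rw [lexCleanup, dif_pos h, if_neg hnil]; exact ih
  | case3 s idx h =>
    rw [lexCleanup, dif_neg h]

-- the `if len(neighbor_position) == 1` insert / pop-from-the-end while loop of A
def lexInsertStep (r : List (List Int) × List (List Int × Nat)) : List (List Int) :=
  match r.2 with
  | [(cl, i)] => PySem.List.insert r.1 (i : Int) cl
  | np => np.foldr (fun p acc => PySem.List.insert acc (p.2 : Int) p.1) r.1

-- both branches replay the recorded inserts from the end
theorem pv_insertStep_foldr (r : List (List Int) × List (List Int × Nat)) :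
    lexInsertStep r = r.2.foldr (fun p acc => PySem.List.insert acc (p.2 : Int) p.1) r.1 := by
  obtain ⟨s2, np⟩ := r
  match np with
  | [] => rfl
  | [(cl, i)] => rfl
  | p :: q :: t => rfl

theorem pv_step_sum (nbrs : List Int) (hn : nbrs.Nodup) (s1 : List (List Int)) :
    pvSumLen (lexCleanup (lexInsertStep (lexCollect nbrs s1 0)) 0) ≤ pvSumLen s1 := by
  refine le_trans (pv_cleanup_sum_le _ 0) ?_
  rw [pv_insertStep_foldr, pv_foldr_insert_sum]
  rw [pv_collect_sum nbrs hn s1 0]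

theorem pv_loop_dec1 (rest : List (List Int)) :
    Prod.Lex (· < ·) (· < ·) (pvSumLen rest, rest.length)
      (pvSumLen ([] :: rest), ([] :: rest).length) := by
  apply Prod.Lex.right' <;> simp [pvSumLen]

theorem pv_loop_dec2 (d : PySem.Dict Int (List Int)) (v : Int) (ctail : List Int)
    (rest : List (List Int)) (nodes : PySem.Set Int) :
    Prod.Lex (· < ·) (· < ·)
      (pvSumLen (lexCleanup (lexInsertStep (lexCollect (PySem.Set.inter
          (PySem.Set.ofList (d.getD v [])) ((PySem.Set.remove? nodes v).getD nodes))
          (ctail :: rest) 0)) 0),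
        (lexCleanup (lexInsertStep (lexCollect (PySem.Set.inter
          (PySem.Set.ofList (d.getD v [])) ((PySem.Set.remove? nodes v).getD nodes))
          (ctail :: rest) 0)) 0).length)
      (pvSumLen ((v :: ctail) :: rest), ((v :: ctail) :: rest).length) := by
  apply Prod.Lex.left
  have hn : (PySem.Set.inter (PySem.Set.ofList (d.getD v []))
      ((PySem.Set.remove? nodes v).getD nodes)).Nodup :=
    PySem.Set.nodup_inter _ _ (PySem.Set.nodup_ofList _)
  have h := pv_step_sum _ hn (ctail :: rest)
  simp only [pvSumLen, List.map_cons, List.sum_cons, List.length_cons] at h ⊢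
  omega

-- the `while len(s) != 0` loop of A
def lexLoop (d : PySem.Dict Int (List Int)) :
    List (List Int) → PySem.Set Int → List Int → List Int
  | [], _, lexbfs => lexbfs
  | [] :: rest, nodes, lexbfs => lexLoop d rest nodes lexbfs
  | (v :: ctail) :: rest, nodes, lexbfs =>
    -- nodes.remove(visit): never raises, the visited node is an unvisited node
    let nodes1 := (PySem.Set.remove? nodes v).getD nodes
    let nbrs := PySem.Set.inter (PySem.Set.ofList (d.getD v [])) nodes1
    let r := lexCollect nbrs (ctail :: rest) 0
    -- `if len(neighbor_position) == 1` insert once, else the pop-from-the-end while loop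
    let s3 := lexInsertStep r
    lexLoop d (lexCleanup s3 0) nodes1 (lexbfs ++ [v])
termination_by s _ _ => (pvSumLen s, s.length)
decreasing_by
  · exact pv_loop_dec1 rest
  · exact pv_loop_dec2 d v ctail rest nodes

def interval_grafs_lexbfs (g : List (Int × List Int)) : List Int :=
  let d := PySem.Dict.ofList g
  let nodes := PySem.Set.ofList d.keys
  lexLoop d [PySem.List.sorted nodes (fun x => x) false] nodes []

-- ===== PORT B =====

-- the two parts each class is split into
def pvIn (nbrs : PySem.Set Int) (c : List Int) : List Int :=
  c.filter (fun x => PySem.Set.contains nbrs x)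
def pvOut (nbrs : PySem.Set Int) (c : List Int) : List Int :=
  c.filter (fun x => !PySem.Set.contains nbrs x)
def pvFB (nbrs : PySem.Set Int) (c : List Int) : List (List Int) :=
  (if pvIn nbrs c ≠ [] then [pvIn nbrs c] else []) ++ (if pvOut nbrs c ≠ [] then [pvOut nbrs c] else [])

-- the `for c in [first[1:]] + classes[1:]` rebuild: neighbour part then the rest, empties dropped
def lexAltRefine (nbrs : PySem.Set Int) (cls : List (List Int)) : List (List Int) :=
  cls.foldl (fun new c =>
    let inn := c.filter (fun x => PySem.Set.contains nbrs x)
    let out := c.filter (fun x => !PySem.Set.contains nbrs x)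
    (new ++ (if inn ≠ [] then [inn] else []) ++ (if out ≠ [] then [out] else []))) []

theorem pv_altRefine_flatMap (nbrs : PySem.Set Int) (cls : List (List Int)) :
    lexAltRefine nbrs cls = cls.flatMap (pvFB nbrs) := by
  unfold lexAltRefine
  rw [show (fun (new : List (List Int)) (c : List Int) =>
      let inn := c.filter (fun x => PySem.Set.contains nbrs x)
      let out := c.filter (fun x => !PySem.Set.contains nbrs x)
      (new ++ (if inn ≠ [] then [inn] else []) ++ (if out ≠ [] then [out] else [])))
    = (fun new c => new ++ pvFB nbrs c) from ?_]
  · exact PySem.List.foldl_append_eq_flatMap (pvFB nbrs) cls []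
  · funext new c
    simp only [pvFB, pvIn, pvOut, List.append_assoc]

theorem pv_inout_len (nbrs : PySem.Set Int) (c : List Int) :
    (pvIn nbrs c).length + (pvOut nbrs c).length = c.length := by
  induction c with
  | nil => simp [pvIn, pvOut]
  | cons x t ih =>
    simp only [pvIn, pvOut, List.filter_cons] at ih ⊢
    by_cases hx : PySem.Set.contains nbrs x = true
    · rw [if_pos hx, if_neg (by rw [hx]; decide)]
      simp only [List.length_cons]
      omega
    · have hx' : PySem.Set.contains nbrs x = false := by
        cases h : PySem.Set.contains nbrs x
        · rfl
        · exact absurd h hx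
      rw [if_neg hx, if_pos (by rw [hx']; rfl)]
      simp only [List.length_cons]
      omega

theorem pv_altRefine_sum (nbrs : PySem.Set Int) (cls : List (List Int)) :
    pvSumLen (lexAltRefine nbrs cls) ≤ pvSumLen cls := by
  rw [pv_altRefine_flatMap]
  induction cls with
  | nil => simp [pvSumLen]
  | cons c t ih =>
    have hc : pvSumLen (pvFB nbrs c) ≤ c.length := by
      have := pv_inout_len nbrs c
      unfold pvFB
      split <;> split <;>
        simp only [pvSumLen, List.map_append, List.sum_append, List.map_cons, List.map_nil,
          List.sum_cons, List.sum_nil] <;> omega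
    simp only [List.flatMap_cons, pvSumLen, List.map_append, List.sum_append,
      List.map_cons, List.sum_cons] at *
    omega

theorem pv_alt_dec2 (d : PySem.Dict Int (List Int)) (v : Int) (ftail : List Int)
    (rest : List (List Int)) :
    Prod.Lex (· < ·) (· < ·)
      (pvSumLen (lexAltRefine (PySem.Set.ofList (d.getD v [])) (ftail :: rest)),
        (lexAltRefine (PySem.Set.ofList (d.getD v [])) (ftail :: rest)).length)
      (pvSumLen ((v :: ftail) :: rest), ((v :: ftail) :: rest).length) := by
  apply Prod.Lex.left
  have h := pv_altRefine_sum (PySem.Set.ofList (d.getD v [])) (ftail :: rest)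
  simp only [pvSumLen, List.map_cons, List.sum_cons, List.length_cons] at h ⊢
  omega

-- the `while classes` loop of B
def lexAltLoop (d : PySem.Dict Int (List Int)) : List (List Int) → List Int
  | [] => []
  | [] :: rest => lexAltLoop d rest   -- unreachable: B's classes are nonempty by construction
  | (v :: ftail) :: rest =>
    v :: lexAltLoop d (lexAltRefine (PySem.Set.ofList (d.getD v [])) (ftail :: rest))
termination_by cls => (pvSumLen cls, cls.length)
decreasing_by
  · exact pv_loop_dec1 rest
  · exact pv_alt_dec2 d v ftail rest

def interval_grafs_lexbfs_alt (g : List (Int × List Int)) : List Int :=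
  let d := PySem.Dict.ofList g
  lexAltLoop d
    (if d.keys ≠ [] then [PySem.List.sorted d.keys (fun x => x) false] else [])

-- ===== PRECONDITION & SPEC =====
def Spec_interval_grafs_lexbfs (g : List (Int × List Int)) (out : List Int) : Prop := out = interval_grafs_lexbfs_alt g
instance (g : List (Int × List Int)) (out : List Int) : Decidable (Spec_interval_grafs_lexbfs g out) := by unfold Spec_interval_grafs_lexbfs; infer_instance

-- ===== CLAIM (what is proved, stated in full; the proofs are below) =====
def Claim_equal_interval_grafs_lexbfs : Prop := ∀ (g : List (Int × List Int)), Dom_interval_grafs_lexbfs g → Spec_interval_grafs_lexbfs g (interval_grafs_lexbfs g)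

-- ===== LEMMAS AND PROOFS =====

-- the Boolean "is not the empty class" used to drop empty classes
def pvNE (C : List Int) : Bool := !decide (C = ([] : List Int))

-- the loop invariant: classes strictly increasing and pairwise disjoint, and the
-- unvisited-node set is exactly the union of the classes
def pvInv (s : List (List Int)) (nodes : PySem.Set Int) : Prop :=
  (∀ C ∈ s, C.Pairwise (· < ·)) ∧
  s.Pairwise (fun C D => ∀ x ∈ C, x ∉ D) ∧
  (∀ x : Int, x ∈ nodes ↔ ∃ C ∈ s, x ∈ C)

-- A's collected list and residual class, and its per-class contribution to the new class list
def pvCollA (nbrs C : List Int) : List Int :=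
  PySem.List.sorted (PySem.Set.inter nbrs (PySem.Set.ofList C)) (fun x => x) false
def pvRemA (nbrs C : List Int) : List Int :=
  (pvCollA nbrs C).foldl (fun cur x => (PySem.List.remove? cur x).getD cur) C
def pvFA (nbrs C : List Int) : List (List Int) :=
  if PySem.Set.inter nbrs (PySem.Set.ofList C) ≠ [] ∧ nbrs ≠ [] then [pvCollA nbrs C, pvRemA nbrs C]
  else [C]

-- removing each element of l once is filtering, when the class has no duplicates
theorem pv_foldl_remove_eq_filter (l : List Int) :
    ∀ (C : List Int), C.Nodup →
      l.foldl (fun cur x => (PySem.List.remove? cur x).getD cur) C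
        = C.filter (fun y => !decide (y ∈ l)) := by
  induction l with
  | nil => intro C _; simp
  | cons x t ih =>
    intro C hC
    rw [List.foldl_cons]
    by_cases hx : x ∈ C
    · rw [PySem.List.remove?_eq_some_erase C x hx, Option.getD_some,
        hC.erase_eq_filter x, ih _ (hC.filter _), List.filter_filter]
      apply List.filter_congr
      intro a _
      by_cases hax : a = x <;> simp [hax]
    · rw [(PySem.List.remove?_eq_none_iff C x).mpr hx, Option.getD_none, ih _ hC]
      apply List.filter_congr
      intro a ha
      have hax : a ≠ x := fun he => hx (he ▸ ha)
      simp [hax]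

-- inserting at a positive position commutes with the head
theorem pv_insert_cons (m : Nat) (hm : 1 ≤ m) (x : List Int) (l : List (List Int)) (v : List Int) :
    PySem.List.insert (x :: l) (m : Int) v = x :: PySem.List.insert l ((m - 1 : Nat) : Int) v := by
  rw [pv_insert_take_drop, pv_insert_take_drop]
  obtain ⟨k, rfl⟩ : ∃ k, m = k + 1 := ⟨m - 1, by omega⟩
  simp [List.take_succ_cons, List.drop_succ_cons]

theorem pv_foldr_insert_shift (np : List (List Int × Nat)) (i : Nat) (x : List Int)
    (l : List (List Int)) (h : ∀ p ∈ np, i + 1 ≤ p.2) :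
    np.foldr (fun p acc => PySem.List.insert acc ((p.2 - i : Nat) : Int) p.1) (x :: l)
      = x :: np.foldr (fun p acc => PySem.List.insert acc ((p.2 - (i + 1) : Nat) : Int) p.1) l := by
  induction np with
  | nil => rfl
  | cons p t ih =>
    simp only [List.foldr_cons]
    rw [ih (fun q hq => h q (by simp [hq]))]
    have hp : i + 1 ≤ p.2 := h p (by simp)
    rw [pv_insert_cons (p.2 - i) (by omega)]
    rw [Nat.sub_sub]

theorem pv_collect_pos (nbrs : List Int) :
    ∀ (s : List (List Int)) (i : Nat), ∀ p ∈ (lexCollect nbrs s i).2, i ≤ p.2 := by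
  intro s
  induction s with
  | nil => intro i p hp; simp [lexCollect] at hp
  | cons C rest ih =>
    intro i p hp
    rw [lexCollect] at hp
    split at hp
    · simp only [List.mem_cons] at hp
      rcases hp with rfl | hp
      · simp
      · exact le_trans (by omega) (ih (i + 1) p hp)
    · exact le_trans (by omega) (ih (i + 1) p hp)

-- the recorded positions, replayed back-to-front, interleave each collected list
-- directly before its residual class
theorem pv_ins_collect (nbrs : List Int) :
    ∀ (s : List (List Int)) (i : Nat),
      ((lexCollect nbrs s i).2).foldr
          (fun p acc => PySem.List.insert acc ((p.2 - i : Nat) : Int) p.1)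
          (lexCollect nbrs s i).1
        = s.flatMap (pvFA nbrs) := by
  intro s
  induction s with
  | nil => intro i; simp [lexCollect]
  | cons C rest ih =>
    intro i
    rw [lexCollect]
    simp only []
    split
    · rename_i hcond
      rw [List.foldr_cons]
      rw [pv_foldr_insert_shift _ i _ _ (fun q hq => by
        have := pv_collect_pos nbrs rest (i + 1) q hq; omega)]
      rw [ih (i + 1)]
      have h0 : ((i - i : Nat) : Int) = ((0 : Nat) : Int) := by norm_num
      rw [h0, pv_insert_take_drop]
      simp only [List.take_zero, List.drop_zero, List.nil_append]
      rw [List.flatMap_cons]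
      rw [pvFA, if_pos hcond]
      rfl
    · rename_i hcond
      rw [pv_foldr_insert_shift _ i _ _ (fun q hq => by
        have := pv_collect_pos nbrs rest (i + 1) q hq; omega)]
      rw [ih (i + 1)]
      rw [List.flatMap_cons, pvFA, if_neg hcond]
      rfl

theorem pv_s3_eq (nbrs : List Int) (s1 : List (List Int)) :
    lexInsertStep (lexCollect nbrs s1 0) = s1.flatMap (pvFA nbrs) := by
  rw [pv_insertStep_foldr]
  have h := pv_ins_collect nbrs s1 0
  simp only [Nat.sub_zero] at h
  exact h

-- the post-pass removal of empty classes is invisible modulo empty classes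
theorem pv_filter_erase_nil (s : List (List Int)) :
    (s.erase ([] : List Int)).filter pvNE = s.filter pvNE := by
  induction s with
  | nil => simp
  | cons C t ih =>
    by_cases hC : C = ([] : List Int)
    · subst hC
      rw [List.erase_cons, if_pos (by simp)]
      rw [List.filter_cons, if_neg (by simp [pvNE])]
    · rw [List.erase_cons, if_neg (by simpa using hC)]
      simp only [List.filter_cons]
      rw [ih]

theorem pv_cleanup_filter (s : List (List Int)) (idx : Nat) :
    (lexCleanup s idx).filter pvNE = s.filter pvNE := by
  induction s, idx using lexCleanup.induct with
  | case1 s idx h hnil ih =>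
    rw [lexCleanup, dif_pos h, if_pos hnil]
    rw [ih]
    cases hr : PySem.List.remove? s ([] : List Int) with
    | none => simp
    | some t =>
      have hmem : ([] : List Int) ∈ s := by
        by_contra hne
        rw [(PySem.List.remove?_eq_none_iff s ([] : List Int)).mpr hne] at hr
        simp at hr
      rw [PySem.List.remove?_eq_some_erase s ([] : List Int) hmem] at hr
      cases hr
      simp [pv_filter_erase_nil]
  | case2 s idx h hnil ih =>
    rw [lexCleanup, dif_pos h, if_neg hnil]; exact ih
  | case3 s idx h => rw [lexCleanup, dif_neg h]

-- per-class equalities between A's collected/residual and B's two filters, under the invariant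
theorem pv_collA_eq (nbrsRaw : List Int) (nodes1 : PySem.Set Int) (C : List Int)
    (hC : C.Pairwise (· < ·)) (hmem : ∀ x ∈ C, x ∈ nodes1) :
    pvCollA (PySem.Set.inter (PySem.Set.ofList nbrsRaw) nodes1) C
      = pvIn (PySem.Set.ofList nbrsRaw) C := by
  apply PySem.List.sorted_eq_of_perm_of_pairwise_lt
  · apply List.perm_of_nodup_nodup_toFinset_eq
    · exact hC.nodup.filter _
    · exact PySem.Set.nodup_inter _ _ (PySem.Set.nodup_inter _ _ (PySem.Set.nodup_ofList _))
    · ext x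
      simp only [List.mem_toFinset, List.mem_filter, PySem.Set.mem_inter, PySem.Set.mem_ofList,
        pvIn, PySem.Set.contains_iff]
      constructor
      · rintro ⟨hxC, hxn⟩
        exact ⟨⟨hxn, hmem x hxC⟩, hxC⟩
      · rintro ⟨⟨hxn, _⟩, hxC⟩
        exact ⟨hxC, hxn⟩
  · exact hC.filter _

theorem pv_remA_eq (nbrsRaw : List Int) (nodes1 : PySem.Set Int) (C : List Int)
    (hC : C.Pairwise (· < ·)) (hmem : ∀ x ∈ C, x ∈ nodes1) :
    pvRemA (PySem.Set.inter (PySem.Set.ofList nbrsRaw) nodes1) C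
      = pvOut (PySem.Set.ofList nbrsRaw) C := by
  rw [pvRemA, pv_foldl_remove_eq_filter _ C hC.nodup,
    pv_collA_eq nbrsRaw nodes1 C hC hmem]
  apply List.filter_congr
  intro a ha
  by_cases hp : PySem.Set.contains (PySem.Set.ofList nbrsRaw) a = true
  · have hain : a ∈ pvIn (PySem.Set.ofList nbrsRaw) C := List.mem_filter.mpr ⟨ha, hp⟩
    have hraw : a ∈ nbrsRaw := by
      have := (PySem.Set.contains_iff (PySem.Set.ofList nbrsRaw) a).mp hp
      exact (PySem.Set.mem_ofList nbrsRaw a).mp this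
    simp [hain, hraw]
  · have hain : a ∉ pvIn (PySem.Set.ofList nbrsRaw) C := by
      intro hc
      exact hp (List.mem_filter.mp hc).2
    have hraw : a ∉ nbrsRaw := by
      intro hc
      exact hp ((PySem.Set.contains_iff _ _).mpr ((PySem.Set.mem_ofList nbrsRaw a).mpr hc))
    simp only [Bool.not_eq_true] at hp
    simp [hain, hraw]

theorem pv_cond_iff (nbrsRaw : List Int) (nodes1 : PySem.Set Int) (C : List Int)
    (hC : C.Pairwise (· < ·)) (hmem : ∀ x ∈ C, x ∈ nodes1) :
    (PySem.Set.inter (PySem.Set.inter (PySem.Set.ofList nbrsRaw) nodes1) (PySem.Set.ofList C) ≠ []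
        ∧ PySem.Set.inter (PySem.Set.ofList nbrsRaw) nodes1 ≠ [])
      ↔ pvIn (PySem.Set.ofList nbrsRaw) C ≠ [] := by
  have hco := pv_collA_eq nbrsRaw nodes1 C hC hmem
  constructor
  · rintro ⟨h1, _⟩
    intro hin
    rw [← hco] at hin
    rw [pvCollA, PySem.List.sorted_eq_nil_iff] at hin
    exact h1 hin
  · intro hin
    have hne : pvCollA (PySem.Set.inter (PySem.Set.ofList nbrsRaw) nodes1) C ≠ [] := by
      rw [hco]; exact hin
    rw [pvCollA, Ne, PySem.List.sorted_eq_nil_iff] at hne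
    refine ⟨hne, ?_⟩
    intro he
    apply hne
    rw [he]
    rfl

-- A's per-class contribution, with empties dropped, is B's per-class contribution
theorem pv_fA_filter (nbrsRaw : List Int) (nodes1 : PySem.Set Int) (C : List Int)
    (hC : C.Pairwise (· < ·)) (hmem : ∀ x ∈ C, x ∈ nodes1) :
    (pvFA (PySem.Set.inter (PySem.Set.ofList nbrsRaw) nodes1) C).filter pvNE
      = pvFB (PySem.Set.ofList nbrsRaw) C := by
  rw [pvFA, pvFB]
  by_cases hcond : pvIn (PySem.Set.ofList nbrsRaw) C ≠ []
  · rw [if_pos ((pv_cond_iff nbrsRaw nodes1 C hC hmem).mpr hcond)]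
    rw [pv_collA_eq nbrsRaw nodes1 C hC hmem, pv_remA_eq nbrsRaw nodes1 C hC hmem]
    rw [if_pos hcond]
    by_cases hout : pvOut (PySem.Set.ofList nbrsRaw) C ≠ []
    · rw [if_pos hout]
      rw [List.filter_cons, if_pos (by simp [pvNE, hcond]),
        List.filter_cons, if_pos (by simp [pvNE, hout])]
      simp
    · rw [if_neg hout]
      simp only [Ne, not_not] at hout
      rw [List.filter_cons, if_pos (by simp [pvNE, hcond]),
        List.filter_cons, if_neg (by simp [pvNE, hout])]
      simp
  · rw [if_neg (fun h => hcond ((pv_cond_iff nbrsRaw nodes1 C hC hmem).mp h))]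
    rw [if_neg hcond]
    simp only [Ne, not_not] at hcond
    have hCout : pvOut (PySem.Set.ofList nbrsRaw) C = C := by
      apply List.filter_eq_self.mpr
      intro a ha
      simp only [Bool.not_eq_eq_eq_not, Bool.not_true]
      by_contra hc
      have : a ∈ pvIn (PySem.Set.ofList nbrsRaw) C := by
        rw [pvIn, List.mem_filter]
        exact ⟨ha, by simpa using hc⟩
      rw [hcond] at this
      simp at this
    rw [hCout]
    by_cases hCnil : C = ([] : List Int)
    · subst hCnil
      rw [List.filter_cons, if_neg (by simp [pvNE])]
      simp
    · rw [List.filter_cons, if_pos (by simp [pvNE, hCnil])]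
      simp [hCnil]

-- each part B produces from a class is one of the two filters of that class
theorem pv_fB_cases (nbrs : PySem.Set Int) (C D : List Int) (hD : D ∈ pvFB nbrs C) :
    D = pvIn nbrs C ∨ D = pvOut nbrs C := by
  rw [pvFB] at hD
  rcases List.mem_append.mp hD with h | h
  · left
    split at h <;> simp_all
  · right
    split at h <;> simp_all

theorem pv_fB_sublist (nbrs : PySem.Set Int) (C D : List Int) (hD : D ∈ pvFB nbrs C) :
    D.Sublist C := by
  rcases pv_fB_cases nbrs C D hD with rfl | rfl <;> exact List.filter_sublist

theorem pv_fB_mem (nbrs : PySem.Set Int) (C : List Int) :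
    ∀ D ∈ pvFB nbrs C, ∀ x ∈ D, x ∈ C :=
  fun D hD x hx => (pv_fB_sublist nbrs C D hD).mem hx

theorem pv_fB_pairwise (nbrs : PySem.Set Int) (C : List Int) :
    (pvFB nbrs C).Pairwise (fun C D => ∀ x ∈ C, x ∉ D) := by
  have hdisj : ∀ x ∈ pvIn nbrs C, x ∉ pvOut nbrs C := by
    intro x hxin hxout
    have h1 := (List.mem_filter.mp hxin).2
    have h2 := (List.mem_filter.mp hxout).2
    rw [h1] at h2
    simp at h2
  rw [pvFB]
  by_cases h1 : pvIn nbrs C ≠ []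
  · rw [if_pos h1]
    by_cases h2 : pvOut nbrs C ≠ []
    · rw [if_pos h2]
      refine List.pairwise_cons.mpr ⟨?_, List.pairwise_singleton _ _⟩
      intro D hD x hx
      rcases List.mem_singleton.mp hD with rfl
      exact hdisj x hx
    · rw [if_neg h2, List.append_nil]
      exact List.pairwise_singleton _ _
  · rw [if_neg h1, List.nil_append]
    by_cases h2 : pvOut nbrs C ≠ []
    · rw [if_pos h2]
      exact List.pairwise_singleton _ _
    · rw [if_neg h2]
      exact List.Pairwise.nil

theorem pv_fB_nil (nbrs : PySem.Set Int) : pvFB nbrs ([] : List Int) = [] := by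
  simp [pvFB, pvIn, pvOut]

-- a node goes to exactly one part of its class
theorem pv_fB_cover (nbrs : PySem.Set Int) (C : List Int) (x : Int) (hx : x ∈ C) :
    ∃ D ∈ pvFB nbrs C, x ∈ D := by
  by_cases hp : PySem.Set.contains nbrs x = true
  · have hxin : x ∈ pvIn nbrs C := List.mem_filter.mpr ⟨hx, hp⟩
    refine ⟨pvIn nbrs C, ?_, hxin⟩
    rw [pvFB]
    apply List.mem_append.mpr
    left
    rw [if_pos (List.ne_nil_of_mem hxin)]
    simp
  · have hp' : PySem.Set.contains nbrs x = false := by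
      cases h : PySem.Set.contains nbrs x
      · rfl
      · exact absurd h hp
    have hxout : x ∈ pvOut nbrs C := List.mem_filter.mpr ⟨hx, by rw [hp']; rfl⟩
    refine ⟨pvOut nbrs C, ?_, hxout⟩
    rw [pvFB]
    apply List.mem_append.mpr
    right
    rw [if_pos (List.ne_nil_of_mem hxout)]
    simp

theorem pv_flatMap_congr (f g : List Int → List (List Int)) (s : List (List Int))
    (h : ∀ C ∈ s, f C = g C) : s.flatMap f = s.flatMap g := by
  induction s with
  | nil => rfl
  | cons C t ih =>
    simp only [List.flatMap_cons]
    rw [h C (by simp), ih (fun C' hC' => h C' (by simp [hC']))]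

-- classes refine the same way whether or not empty classes are carried along
theorem pv_flatMap_skip_nil (g : List Int → List (List Int)) (hg : g [] = [])
    (s : List (List Int)) :
    (s.filter pvNE).flatMap g = s.flatMap g := by
  induction s with
  | nil => rfl
  | cons C t ih =>
    by_cases hC : C = ([] : List Int)
    · subst hC
      rw [List.filter_cons, if_neg (by simp [pvNE]), List.flatMap_cons, hg, List.nil_append, ih]
    · rw [List.filter_cons, if_pos (by simp [pvNE, hC]), List.flatMap_cons, List.flatMap_cons, ih]

-- a Pairwise property that is vacuous on empty classes transfers back from the filtered list
theorem pv_pairwise_of_filter (s : List (List Int))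
    (h1 : (s.filter pvNE).Pairwise (fun C D => ∀ x ∈ C, x ∉ D)) :
    s.Pairwise (fun C D => ∀ x ∈ C, x ∉ D) := by
  induction s with
  | nil => exact List.Pairwise.nil
  | cons C t ih =>
    by_cases hC : C = ([] : List Int)
    · subst hC
      rw [List.filter_cons, if_neg (by simp [pvNE])] at h1
      exact List.Pairwise.cons (fun D _ x hx => by simp at hx) (ih h1)
    · rw [List.filter_cons, if_pos (by simp [pvNE, hC])] at h1
      rcases List.pairwise_cons.mp h1 with ⟨hhead, htail⟩
      refine List.Pairwise.cons ?_ (ih htail)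
      intro D hD x hx
      by_cases hDnil : D = ([] : List Int)
      · subst hDnil; simp
      · exact hhead D (List.mem_filter.mpr ⟨hD, by simp [pvNE, hDnil]⟩) x hx

-- disjointness is preserved by refining each class into parts of itself
theorem pv_disj_flatMap (f : List Int → List (List Int)) (s : List (List Int))
    (hin : ∀ C, ∀ D ∈ f C, ∀ x ∈ D, x ∈ C)
    (hself : ∀ C ∈ s, (f C).Pairwise (fun C D => ∀ x ∈ C, x ∉ D))
    (hp : s.Pairwise (fun C D => ∀ x ∈ C, x ∉ D)) :
    (s.flatMap f).Pairwise (fun C D => ∀ x ∈ C, x ∉ D) := by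
  induction s with
  | nil => exact List.Pairwise.nil
  | cons C t ih =>
    rw [List.flatMap_cons]
    rcases List.pairwise_cons.mp hp with ⟨hCt, hpt⟩
    apply List.pairwise_append.mpr
    refine ⟨hself C (by simp), ih (fun C' hC' => hself C' (by simp [hC'])) hpt, ?_⟩
    intro D hD E hE y hxD
    have hxC : y ∈ C := hin C D hD y hxD
    rcases List.mem_flatMap.mp hE with ⟨C', hC', hEC'⟩
    intro hxE
    exact hCt C' hC' y hxC (hin C' E hEC' y hxE)

-- one visiting step of A, with the new class list in interleaved form
theorem pv_loop_step (d : PySem.Dict Int (List Int)) (v : Int) (ctail : List Int)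
    (rest : List (List Int)) (nodes : PySem.Set Int) (acc : List Int) :
    lexLoop d ((v :: ctail) :: rest) nodes acc
      = lexLoop d
          (lexCleanup ((ctail :: rest).flatMap (pvFA (PySem.Set.inter
            (PySem.Set.ofList (d.getD v [])) ((PySem.Set.remove? nodes v).getD nodes)))) 0)
          ((PySem.Set.remove? nodes v).getD nodes) (acc ++ [v]) := by
  simp only [lexLoop]
  rw [pv_s3_eq]

-- the main simulation: A's loop equals B's loop on the class list without its empty classes
theorem pv_main (d : PySem.Dict Int (List Int)) :
    ∀ (s : List (List Int)) (nodes : PySem.Set Int) (acc : List Int),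
      pvInv s nodes →
      lexLoop d s nodes acc = acc ++ lexAltLoop d (s.filter pvNE) := by
  intro s nodes acc
  induction s, nodes, acc using lexLoop.induct d with
  | case1 nodes acc =>
    intro _
    simp only [lexLoop, lexAltLoop, List.filter_nil, List.append_nil]
  | case2 rest nodes acc ih =>
    intro hinv
    obtain ⟨hsort, hdisj, hunion⟩ := hinv
    simp only [lexLoop]
    rw [ih ⟨fun C hC => hsort C (by simp [hC]), (List.pairwise_cons.mp hdisj).2,
      fun x => (hunion x).trans (by simp)⟩]
    rw [List.filter_cons, if_neg (by simp [pvNE])]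
  | case3 v ctail rest nodes acc nodes1' nbrs' r' s3' ih =>
    intro hinv
    obtain ⟨hsort, hdisj, hunion⟩ := hinv
    have ih' : pvInv (lexCleanup (lexInsertStep (lexCollect (PySem.Set.inter
          (PySem.Set.ofList (d.getD v [])) ((PySem.Set.remove? nodes v).getD nodes))
          (ctail :: rest) 0)) 0) ((PySem.Set.remove? nodes v).getD nodes) →
        lexLoop d (lexCleanup (lexInsertStep (lexCollect (PySem.Set.inter
          (PySem.Set.ofList (d.getD v [])) ((PySem.Set.remove? nodes v).getD nodes))
          (ctail :: rest) 0)) 0) ((PySem.Set.remove? nodes v).getD nodes) (acc ++ [v])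
        = acc ++ [v] ++ lexAltLoop d (List.filter pvNE (lexCleanup (lexInsertStep
          (lexCollect (PySem.Set.inter (PySem.Set.ofList (d.getD v []))
          ((PySem.Set.remove? nodes v).getD nodes)) (ctail :: rest) 0)) 0)) := ih
    clear ih
    have hvnodes : v ∈ nodes := (hunion v).mpr ⟨v :: ctail, by simp, by simp⟩
    have hnodes1 : (PySem.Set.remove? nodes v).getD nodes = PySem.Set.discard nodes v := by
      rw [PySem.Set.remove?, if_pos ((PySem.Set.contains_iff nodes v).mpr hvnodes)]
      rfl
    have hmem1 : ∀ x : Int, x ∈ (PySem.Set.remove? nodes v).getD nodes ↔ (x ∈ nodes ∧ x ≠ v) := by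
      intro x; rw [hnodes1]; exact PySem.Set.mem_discard nodes v x
    have hheadsort : (v :: ctail).Pairwise (· < ·) := hsort (v :: ctail) (by simp)
    have hheaddisj : ∀ D ∈ rest, ∀ y ∈ v :: ctail, y ∉ D := by
      intro D hD y hy
      exact (List.pairwise_cons.mp hdisj).1 D hD y hy
    have hsort1 : ∀ C ∈ ctail :: rest, C.Pairwise (· < ·) := by
      intro C hC
      rcases List.mem_cons.mp hC with rfl | hC
      · exact (List.pairwise_cons.mp hheadsort).2
      · exact hsort C (by simp [hC])
    have hdisj1 : (ctail :: rest).Pairwise (fun C D => ∀ x ∈ C, x ∉ D) := by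
      refine List.pairwise_cons.mpr ⟨?_, (List.pairwise_cons.mp hdisj).2⟩
      intro D hD x hx
      exact hheaddisj D hD x (by simp [hx])
    have hsub1 : ∀ C ∈ ctail :: rest, ∀ x ∈ C, x ∈ (PySem.Set.remove? nodes v).getD nodes := by
      intro C hC x hx
      rcases List.mem_cons.mp hC with rfl | hC
      · refine (hmem1 x).mpr ⟨(hunion x).mpr ⟨v :: C, by simp, by simp [hx]⟩, ?_⟩
        have := (List.pairwise_cons.mp hheadsort).1 x hx
        omega
      · refine (hmem1 x).mpr ⟨(hunion x).mpr ⟨C, by simp [hC], hx⟩, ?_⟩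
        intro he
        exact hheaddisj C hC v (by simp) (he ▸ hx)
    have hcover1 : ∀ x : Int, x ∈ (PySem.Set.remove? nodes v).getD nodes ↔ ∃ C ∈ ctail :: rest, x ∈ C := by
      intro x
      constructor
      · intro hx
        rcases (hmem1 x).mp hx with ⟨hxn, hxv⟩
        rcases (hunion x).mp hxn with ⟨C, hC, hxC⟩
        rcases List.mem_cons.mp hC with rfl | hC
        · rcases List.mem_cons.mp hxC with rfl | hxC
          · exact absurd rfl hxv
          · exact ⟨ctail, by simp, hxC⟩
        · exact ⟨C, by simp [hC], hxC⟩
      · rintro ⟨C, hC, hxC⟩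
        exact hsub1 C hC x hxC
    -- the refined class list, in A's interleaved form and in B's form
    have hfilt : ((ctail :: rest).flatMap (pvFA (PySem.Set.inter (PySem.Set.ofList (d.getD v []))
          ((PySem.Set.remove? nodes v).getD nodes)))).filter pvNE
        = (ctail :: rest).flatMap (pvFB (PySem.Set.ofList (d.getD v []))) := by
      rw [List.filter_flatMap]
      exact pv_flatMap_congr _ _ _ (fun C hC =>
        pv_fA_filter (d.getD v []) ((PySem.Set.remove? nodes v).getD nodes) C
          (hsort1 C hC) (hsub1 C hC))
    have hcfilt : (lexCleanup ((ctail :: rest).flatMap (pvFA (PySem.Set.inter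
          (PySem.Set.ofList (d.getD v [])) ((PySem.Set.remove? nodes v).getD nodes)))) 0).filter pvNE
        = (ctail :: rest).flatMap (pvFB (PySem.Set.ofList (d.getD v []))) := by
      rw [pv_cleanup_filter]
      exact hfilt
    -- the invariant for the next iteration
    have hinv' : pvInv (lexCleanup ((ctail :: rest).flatMap (pvFA (PySem.Set.inter
          (PySem.Set.ofList (d.getD v [])) ((PySem.Set.remove? nodes v).getD nodes)))) 0)
        ((PySem.Set.remove? nodes v).getD nodes) := by
      refine ⟨?_, ?_, ?_⟩
      · intro D hD
        by_cases hDnil : D = ([] : List Int)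
        · subst hDnil; exact List.Pairwise.nil
        · have hDf : D ∈ (ctail :: rest).flatMap (pvFB (PySem.Set.ofList (d.getD v []))) := by
            rw [← hcfilt]
            exact List.mem_filter.mpr ⟨hD, by simp [pvNE, hDnil]⟩
          rcases List.mem_flatMap.mp hDf with ⟨C, hC, hDC⟩
          exact List.Pairwise.sublist (pv_fB_sublist _ C D hDC) (hsort1 C hC)
      · apply pv_pairwise_of_filter
        rw [hcfilt]
        exact pv_disj_flatMap _ _ (fun C => pv_fB_mem _ C)
          (fun C _ => pv_fB_pairwise _ C) hdisj1
      · intro x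
        constructor
        · intro hx
          rcases (hcover1 x).mp hx with ⟨C, hC, hxC⟩
          rcases pv_fB_cover (PySem.Set.ofList (d.getD v [])) C x hxC with ⟨D, hD, hxD⟩
          have hDin : D ∈ (lexCleanup ((ctail :: rest).flatMap (pvFA (PySem.Set.inter
              (PySem.Set.ofList (d.getD v [])) ((PySem.Set.remove? nodes v).getD nodes)))) 0).filter pvNE := by
            rw [hcfilt]
            exact List.mem_flatMap.mpr ⟨C, hC, hD⟩
          exact ⟨D, List.mem_of_mem_filter hDin, hxD⟩
        · rintro ⟨D, hD, hxD⟩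
          have hDnil : D ≠ ([] : List Int) := by
            intro he; subst he; simp at hxD
          have hDf : D ∈ (ctail :: rest).flatMap (pvFB (PySem.Set.ofList (d.getD v []))) := by
            rw [← hcfilt]
            exact List.mem_filter.mpr ⟨hD, by simp [pvNE, hDnil]⟩
          rcases List.mem_flatMap.mp hDf with ⟨C, hC, hDC⟩
          exact hsub1 C hC x (pv_fB_mem _ C D hDC x hxD)
    -- step A, apply the induction hypothesis, and step B
    rw [pv_loop_step]
    rw [pv_s3_eq] at ih'
    rw [ih' hinv']
    rw [hcfilt]
    rw [List.filter_cons, if_pos (by simp [pvNE])]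
    simp only [lexAltLoop]
    have hBref : lexAltRefine (PySem.Set.ofList (d.getD v []))
          (ctail :: rest.filter pvNE)
        = (ctail :: rest).flatMap (pvFB (PySem.Set.ofList (d.getD v []))) := by
      rw [pv_altRefine_flatMap]
      rw [List.flatMap_cons, List.flatMap_cons]
      rw [pv_flatMap_skip_nil _ (pv_fB_nil _) rest]
    rw [hBref]
    simp

-- the two entry points agree
theorem pv_top (g : List (Int × List Int)) :
    interval_grafs_lexbfs g = interval_grafs_lexbfs_alt g := by
  simp only [interval_grafs_lexbfs, interval_grafs_lexbfs_alt]
  have hkeys : PySem.Set.ofList (PySem.Dict.ofList g).keys = (PySem.Dict.ofList g).keys :=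
    PySem.Set.ofList_eq_self_of_nodup _ (PySem.Dict.nodup_keys_ofList g)
  have hinv : pvInv
      [PySem.List.sorted (PySem.Set.ofList (PySem.Dict.ofList g).keys) (fun x => x) false]
      (PySem.Set.ofList (PySem.Dict.ofList g).keys) := by
    refine ⟨?_, by simp, ?_⟩
    · intro C hC
      rcases List.mem_singleton.mp hC with rfl
      exact PySem.List.sorted_ofList_pairwise_lt (PySem.Dict.ofList g).keys
    · intro x
      simp [PySem.List.mem_sorted]
  rw [pv_main (PySem.Dict.ofList g) _ _ [] hinv]
  by_cases hk : (PySem.Dict.ofList g).keys = []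
  · have hs : PySem.List.sorted (PySem.Set.ofList (PySem.Dict.ofList g).keys) (fun x => x) false
        = [] := by
      rw [PySem.List.sorted_eq_nil_iff, hkeys, hk]
    rw [hs, List.filter_cons, if_neg (by simp [pvNE])]
    rw [if_neg (by simpa using hk)]
    simp
  · have hne : PySem.List.sorted (PySem.Set.ofList (PySem.Dict.ofList g).keys) (fun x => x) false
        ≠ [] := by
      rw [Ne, PySem.List.sorted_eq_nil_iff, hkeys]
      exact hk
    rw [List.filter_cons, if_pos (by simp [pvNE, hne])]
    rw [if_pos hk]
    rw [hkeys]
    simp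

-- ===== VERDICT (by name: the statement is the Claim_ definition above) =====
theorem interval_grafs_lexbfs_spec : Claim_equal_interval_grafs_lexbfs := by
  intro g _
  unfold Spec_interval_grafs_lexbfs
  exact pv_top g
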